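-- pv_equiv track=rewrite | github.com/open-contracting-archive/standard-collaborator | django/website/main/standardscache.py | csv_to_html_table
-- ===== SOURCE A (Python) =====
-- def csv_to_html_table(csvreader, table_class):
--     html = []
--     if table_class:
--         table_class += " side-scroll-table"
--     else:
--         table_class = "side-scroll-table"
--     html.append('<table class="%s">' % table_class)
--     for rownum, row in enumerate(csvreader):
--         if rownum == 0:
--             html.append('<thead><tr>')
--             html.extend(['<th>' + column + '</th>' for column in row])
--             html.append('</tr></thead><tbody>')
--         else:
--             html.append('<tr>')
--             html.extend(['<td>' + column + '</td>' for column in row])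
--             html.append('</tr>')
--     html.append('</tbody></table>')
--     return ''.join(html)
-- ===== SOURCE B (Python) =====
-- def csv_to_html_table(csvreader, table_class):
--     rows = list(csvreader)
--     cls = (table_class + " " if table_class else "") + "side-scroll-table"
--     n = len(rows)
--     # table-driven: per-row cell tag and (prefix, suffix) wrapper, computed up front
--     tags = ['th'] + ['td'] * (n - 1)
--     wrappers = [('<thead><tr>', '</tr></thead><tbody>')] + [('<tr>', '</tr>')] * (n - 1)
--     inner = [''.join('<' + t + '>' + c + '</' + t + '>' for c in row)
--              for t, row in zip(tags, rows)]
--     body = ''.join(pre + cells + post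
--                    for (pre, post), cells in zip(wrappers, inner))
--     return '<table class="' + cls + '">' + body + '</tbody></table>'
-- ===== Notes on version B (the rewrite author's own statement) =====
-- stated objective: alternative
-- what changed: B is table-driven in staged passes: it precomputes a per-row tag list and a per-row (prefix,suffix) wrapper table, zips the rows against these tables to wrap cells and rows with no first-row branch inside any loop, then concatenates; A interleaves a rownum==0 branch in a single accumulator loop.
import Mathlib
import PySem

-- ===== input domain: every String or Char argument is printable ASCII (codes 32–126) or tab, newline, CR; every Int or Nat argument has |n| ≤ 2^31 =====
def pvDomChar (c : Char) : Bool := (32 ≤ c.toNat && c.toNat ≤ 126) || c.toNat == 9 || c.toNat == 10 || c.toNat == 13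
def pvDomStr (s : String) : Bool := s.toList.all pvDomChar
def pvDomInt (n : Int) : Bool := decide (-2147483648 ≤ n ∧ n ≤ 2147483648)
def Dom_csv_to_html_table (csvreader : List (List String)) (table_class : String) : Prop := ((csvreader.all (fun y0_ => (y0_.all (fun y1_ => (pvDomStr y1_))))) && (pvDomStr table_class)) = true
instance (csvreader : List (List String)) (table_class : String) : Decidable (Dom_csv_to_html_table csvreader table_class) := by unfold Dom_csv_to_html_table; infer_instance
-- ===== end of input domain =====

-- B is table-driven in staged passes (precomputed per-row tag and wrapper tables, zipped with the
-- rows, no first-row branch inside any loop) instead of A's single accumulator loop (objective: alternative).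

-- ===== PORT A =====
def csv_to_html_table (csvreader : List (List String)) (table_class : String) : String :=
  let table_class := if table_class ≠ "" then table_class ++ " side-scroll-table" else "side-scroll-table"
  let html : List String := ["<table class=\"" ++ table_class ++ "\">"]
  let html := (PySem.List.enumerate csvreader).foldl (fun acc p =>
    if p.1 == 0 then
      ((acc ++ ["<thead><tr>"]) ++ p.2.map (fun column => "<th>" ++ column ++ "</th>")) ++ ["</tr></thead><tbody>"]
    else
      ((acc ++ ["<tr>"]) ++ p.2.map (fun column => "<td>" ++ column ++ "</td>")) ++ ["</tr>"]) html
  PySem.Str.join "" (html ++ ["</tbody></table>"])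

-- ===== PORT B =====
def csv_to_html_table_alt (csvreader : List (List String)) (table_class : String) : String :=
  let rows := csvreader
  let cls := (if table_class ≠ "" then table_class ++ " " else "") ++ "side-scroll-table"
  let n := rows.length
  let tags := "th" :: List.replicate (n - 1) "td"
  let wrappers := ("<thead><tr>", "</tr></thead><tbody>") :: List.replicate (n - 1) ("<tr>", "</tr>")
  let inner := (tags.zip rows).map (fun p =>
    PySem.Str.join "" (p.2.map (fun c => "<" ++ p.1 ++ ">" ++ c ++ "</" ++ p.1 ++ ">")))
  let body := PySem.Str.join "" ((wrappers.zip inner).map (fun p => p.1.1 ++ p.2 ++ p.1.2))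
  "<table class=\"" ++ cls ++ "\">" ++ body ++ "</tbody></table>"

-- ===== PRECONDITION & SPEC =====
def Spec_csv_to_html_table (csvreader : List (List String)) (table_class : String) (out : String) : Prop := out = csv_to_html_table_alt csvreader table_class
instance (csvreader : List (List String)) (table_class : String) (out : String) : Decidable (Spec_csv_to_html_table csvreader table_class out) := by unfold Spec_csv_to_html_table; infer_instance

-- ===== CLAIM (what is proved, stated in full; the proofs are below) =====
def Claim_equal_csv_to_html_table : Prop := ∀ (csvreader : List (List String)) (table_class : String), Dom_csv_to_html_table csvreader table_class → Spec_csv_to_html_table csvreader table_class (csv_to_html_table csvreader table_class)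

-- ===== LEMMAS AND PROOFS =====
theorem join_empty_sep (l : List (List Char)) : PySem.Chars.join [] l = l.flatten := by
  induction l with
  | nil => rfl
  | cons x xs ih =>
    cases xs with
    | nil => simp [PySem.Chars.join, List.intercalate]
    | cons y ys =>
      simp [PySem.Chars.join, List.intercalate, List.intersperse] at *
      simpa using ih

theorem str_join_empty (l : List String) :
    (PySem.Str.join "" l).toList = (l.map String.toList).flatten := by
  rw [PySem.Str.toList_join]
  simpa using join_empty_sep (l.map String.toList)

theorem zip_replicate_self {α β : Type} (ys : List α) (x : β) :
    (List.replicate ys.length x).zip ys = ys.map (fun y => (x, y)) := by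
  induction ys with
  | nil => rfl
  | cons y ys ih => simp [List.replicate_succ, ih]

theorem zip_replicate_map {α β γ : Type} (ys : List α) (x : β) (f : α → γ) :
    (List.replicate ys.length x).zip (ys.map f) = ys.map (fun y => (x, f y)) := by
  induction ys with
  | nil => rfl
  | cons y ys ih => simp [List.replicate_succ, ih]

theorem cell_td (c : String) : "<" ++ "td" ++ ">" ++ c ++ "</" ++ "td" ++ ">" = "<td>" ++ c ++ "</td>" := by
  show "<td>" ++ c ++ "</" ++ "td" ++ ">" = _
  rw [String.append_assoc, String.append_assoc]; rfl

theorem cell_th (c : String) : "<" ++ "th" ++ ">" ++ c ++ "</" ++ "th" ++ ">" = "<th>" ++ c ++ "</th>" := by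
  show "<th>" ++ c ++ "</" ++ "th" ++ ">" = _
  rw [String.append_assoc, String.append_assoc]; rfl

theorem tail_fold (t : List (List String)) (s : Int) (hs : 1 ≤ s) (acc : List String) :
    (PySem.List.enumerate t s).foldl (fun acc p =>
      if p.1 == 0 then
        ((acc ++ ["<thead><tr>"]) ++ p.2.map (fun column => "<th>" ++ column ++ "</th>")) ++ ["</tr></thead><tbody>"]
      else
        ((acc ++ ["<tr>"]) ++ p.2.map (fun column => "<td>" ++ column ++ "</td>")) ++ ["</tr>"]) acc
    = acc ++ t.flatMap (fun row => ["<tr>"] ++ row.map (fun column => "<td>" ++ column ++ "</td>") ++ ["</tr>"]) := by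
  induction t generalizing s acc with
  | nil => simp [PySem.List.enumerate_nil]
  | cons r rs ih =>
    rw [PySem.List.enumerate_cons, List.foldl_cons]
    have hb : (s == (0:Int)) = false := by simp; omega
    simp only [hb, Bool.false_eq_true, if_false]
    rw [ih (s+1) (by omega)]
    simp

theorem rows_eq {α : Type} (rest : List (List α)) (pre post : List Char) (g : α → List Char) :
    (List.map (fun x => pre :: (List.map g x ++ [post])) rest).flatten.flatten =
    (List.map (fun x => pre ++ ((List.map g x).flatten ++ post)) rest).flatten := by
  induction rest with
  | nil => rfl
  | cons r rs ih => simp [ih]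

-- ===== VERDICT (by name: the statement is the Claim_ definition above) =====
theorem csv_to_html_table_spec : Claim_equal_csv_to_html_table := by
  intro csvreader table_class _
  show csv_to_html_table csvreader table_class = csv_to_html_table_alt csvreader table_class
  simp only [csv_to_html_table, csv_to_html_table_alt]
  cases csvreader with
  | nil =>
    simp only [PySem.List.enumerate_nil, List.foldl_nil, List.length_nil,
      Nat.zero_sub, List.replicate_zero, List.zip_nil_right, List.map_nil]
    apply String.toList_injective
    simp only [str_join_empty]
    split_ifs <;> simp [PySem.Chars.join, List.intercalate]
  | cons header rest =>
    rw [PySem.List.enumerate_cons, List.foldl_cons]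
    simp only [show ((0:Int) == 0) = true from rfl, if_true]
    rw [tail_fold rest (0+1) (by omega)]
    simp only [List.length_cons, Nat.add_sub_cancel, List.zip_cons_cons, List.map_cons,
      zip_replicate_self, List.map_map, Function.comp_def, zip_replicate_map, cell_td, cell_th]
    apply String.toList_injective
    simp only [str_join_empty]
    split_ifs <;>
      simp [List.flatMap_def, List.map_map, List.map_append, join_empty_sep, rows_eq,
        Function.comp_def, List.append_assoc]
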